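-- pv_equiv track=rewrite | github.com/doublej/c4d-to-pixi-encoder | misc.py | _bounds_from_presence
-- ===== SOURCE A (Python) =====
-- from typing import Iterable, List, Optional, Sequence, Tuple
--
-- def _bounds_from_presence(pres: List[bool], block: int, limit: int) -> Tuple[int, int]:
--     """Find first and last True indices scanning in one direction.
--
--     Returns pixel-space [start, end) rounded to block boundaries and clipped to limit.
--     """
--     first = None
--     last = None
--     for i, v in enumerate(pres):
--         if v:
--             if first is None:
--                 first = i
--             last = i
--     if first is None:
--         # no data → keep full dimension
--         return 0, limit
--     start = max(0, min(first * block, limit))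
--     end = max(start, min((last + 1) * block, limit))
--     return start, end
-- ===== SOURCE B (Python) =====
-- def _span(seg, base):
--     """First and last True index of seg (offset by base), by divide and conquer."""
--     n = len(seg)
--     if n == 0:
--         return None
--     if n == 1:
--         return (base, base) if seg[0] else None
--     mid = n // 2
--     left = _span(seg[:mid], base)
--     right = _span(seg[mid:], base + mid)
--     if left is None:
--         return right
--     if right is None:
--         return left
--     return (left[0], right[1])
--
-- def _bounds_from_presence(pres, block, limit):
--     s = _span(pres, 0)
--     if s is None:
--         # no data -> keep full dimension
--         return 0, limit
--     first, last = s
--     start = max(0, min(first * block, limit))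
--     end = max(start, min((last + 1) * block, limit))
--     return start, end
-- ===== Notes on version B (the rewrite author's own statement) =====
-- stated objective: alternative
-- what changed: Replaces A's single stateful forward loop tracking (first,last) with a divide-and-conquer recursion that computes the True-span of each half of the list and merges the two spans; the block-rounding arithmetic is applied to the merged span.
import Mathlib
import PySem

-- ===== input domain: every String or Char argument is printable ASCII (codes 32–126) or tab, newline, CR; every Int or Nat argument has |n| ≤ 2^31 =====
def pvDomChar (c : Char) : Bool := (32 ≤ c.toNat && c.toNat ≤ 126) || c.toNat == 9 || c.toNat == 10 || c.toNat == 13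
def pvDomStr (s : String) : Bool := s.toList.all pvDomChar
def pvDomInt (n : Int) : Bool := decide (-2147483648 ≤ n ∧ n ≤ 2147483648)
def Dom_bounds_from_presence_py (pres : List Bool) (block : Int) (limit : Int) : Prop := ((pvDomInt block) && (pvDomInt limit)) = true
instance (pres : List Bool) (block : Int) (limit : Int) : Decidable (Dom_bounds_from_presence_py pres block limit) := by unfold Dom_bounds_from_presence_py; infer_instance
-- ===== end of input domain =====

-- B replaces A's single stateful forward loop by a divide-and-conquer recursion:
-- the (first,last) True span of each half is computed recursively and the two
-- spans are merged; alternative structure, same O(n) work.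

-- ===== PORT A =====
-- one forward loop over enumerate(pres) maintaining (first, last)
def bounds_from_presence_py (pres : List Bool) (block : Int) (limit : Int) : Int × Int :=
  let fl := (PySem.List.enumerate pres).foldl
    (fun (st : Option Int × Option Int) (p : Int × Bool) =>
      if p.2 then ((match st.1 with | none => some p.1 | some f => some f), some p.1) else st)
    (none, none)
  match fl.1, fl.2 with
  | some first, some last =>
    let start := max 0 (min (first * block) limit)
    (start, max start (min ((last + 1) * block) limit))
  | _, _ => (0, limit)   -- Python: 'if first is None: return 0, limit' (last is None exactly when first is)

-- ===== PORT B =====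
-- Source B's _span: first/last True index of seg (offset by base), by divide and conquer
def pvSpanB (seg : List Bool) (base : Int) : Option (Int × Int) :=
  if _h0 : seg.length = 0 then none
  else if _h1 : seg.length = 1 then
    if seg.headI then some (base, base) else none   -- seg[0], always in range here
  else
    let mid := seg.length / 2
    match pvSpanB (seg.take mid) base, pvSpanB (seg.drop mid) (base + (mid : Int)) with
    | none, right => right
    | some left, none => some left
    | some left, some right => some (left.1, right.2)
termination_by seg.length
decreasing_by
  · simp only [List.length_take]; omega
  · simp only [List.length_drop]; omega

def bounds_from_presence_py_alt (pres : List Bool) (block : Int) (limit : Int) : Int × Int :=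
  match pvSpanB pres 0 with
  | none => (0, limit)   -- no data -> keep full dimension
  | some (first, last) =>
    let start := max 0 (min (first * block) limit)
    (start, max start (min ((last + 1) * block) limit))

-- ===== PRECONDITION & SPEC =====
def Spec_bounds_from_presence_py (pres : List Bool) (block : Int) (limit : Int) (out : Int × Int) : Prop := out = bounds_from_presence_py_alt pres block limit
instance (pres : List Bool) (block : Int) (limit : Int) (out : Int × Int) : Decidable (Spec_bounds_from_presence_py pres block limit out) := by unfold Spec_bounds_from_presence_py; infer_instance

-- ===== CLAIM (what is proved, stated in full; the proofs are below) =====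
def Claim_equal_bounds_from_presence_py : Prop := ∀ (pres : List Bool) (block : Int) (limit : Int), Dom_bounds_from_presence_py pres block limit → Spec_bounds_from_presence_py pres block limit (bounds_from_presence_py pres block limit)

-- ===== LEMMAS AND PROOFS =====

-- the loop body of A's port, named for the proofs
def pvStep : (Option Int × Option Int) → (Int × Bool) → (Option Int × Option Int) :=
  fun st p =>
    if p.2 then ((match st.1 with | none => some p.1 | some f => some f), some p.1) else st

-- closed characterisation of A's loop: first comes from a front scan, last from a back scan
theorem pvLoop_char : ∀ (l : List Bool) (s : Int) (a b : Option Int),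
    (PySem.List.enumerate l s).foldl pvStep (a, b) =
      ((match a with
        | some x => some x
        | none => (PySem.List.index? l true).map (fun k => s + (k : Int))),
       (match PySem.List.index? l.reverse true with
        | some r => some (s + (l.length : Int) - 1 - (r : Int))
        | none => b)) := by
  intro l
  induction l with
  | nil =>
    intro s a b
    simp [PySem.List.enumerate, PySem.List.index?]
    cases a <;> simp
  | cons v rest ih =>
    intro s a b
    rw [PySem.List.enumerate_cons, List.foldl_cons]
    cases v with
    | false =>
      have hstep : pvStep (a, b) (s, false) = (a, b) := by simp [pvStep]
      rw [hstep, ih]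
      refine Prod.ext_iff.mpr ⟨?_, ?_⟩
      · -- first component
        cases a with
        | some x => rfl
        | none =>
          show _ = (PySem.List.index? (false :: rest) true).map (fun k => s + (k : Int))
          rw [PySem.List.index?_cons_of_ne rest (by simp)]
          cases h : PySem.List.index? rest true with
          | none => simp
          | some k => simp; ring_nf
      · -- last component
        show _ = (match PySem.List.index? (false :: rest).reverse true with
          | some r => some (s + ((false :: rest).length : Int) - 1 - (r : Int))
          | none => b)
        by_cases hm : true ∈ rest.reverse
        · rw [show (false :: rest).reverse = rest.reverse ++ [false] by simp,
              PySem.List.index?_append_of_mem _ hm]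
          cases h : PySem.List.index? rest.reverse true with
          | none => exact absurd ((PySem.List.index?_eq_none_iff _ _).mp h) (by simpa using hm)
          | some r => simp; ring_nf
        · have h1 : PySem.List.index? rest.reverse true = none :=
            (PySem.List.index?_eq_none_iff _ _).mpr hm
          have h2 : PySem.List.index? (false :: rest).reverse true = none := by
            refine (PySem.List.index?_eq_none_iff _ _).mpr ?_
            simp at hm ⊢
            exact hm
          rw [h1, h2]
    | true =>
      have hstep : pvStep (a, b) (s, true) =
          ((match a with | none => some s | some f => some f), some s) := by
        simp [pvStep]
      rw [hstep, ih]
      refine Prod.ext_iff.mpr ⟨?_, ?_⟩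
      · cases a with
        | some x => rfl
        | none =>
          show _ = (PySem.List.index? (true :: rest) true).map (fun k => s + (k : Int))
          rw [PySem.List.index?_cons_self]
          simp
      · show _ = (match PySem.List.index? (true :: rest).reverse true with
          | some r => some (s + ((true :: rest).length : Int) - 1 - (r : Int))
          | none => b)
        by_cases hm : true ∈ rest.reverse
        · rw [show (true :: rest).reverse = rest.reverse ++ [true] by simp,
              PySem.List.index?_append_of_mem _ hm]
          cases h : PySem.List.index? rest.reverse true with
          | none => exact absurd ((PySem.List.index?_eq_none_iff _ _).mp h) (by simpa using hm)
          | some r => simp; ring_nf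
        · have h1 : PySem.List.index? rest.reverse true = none :=
            (PySem.List.index?_eq_none_iff _ _).mpr hm
          have h2 : PySem.List.index? (true :: rest).reverse true = some rest.length := by
            rw [show (true :: rest).reverse = rest.reverse ++ [true] by simp]
            simpa using PySem.List.index?_append_singleton_self _ _ hm
          rw [h1, h2]
          simp; ring_nf

-- reference first/last-True scans, for characterising pvSpanB
def pvFst (seg : List Bool) : Option Nat := PySem.List.index? seg true
def pvLst (seg : List Bool) : Option Int :=
  match PySem.List.index? seg.reverse true with
  | some r => some ((seg.length : Int) - 1 - (r : Int))
  | none => none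

theorem pv_index?_append_of_not_mem (l t : List Bool) (v : Bool) (h : v ∉ l) :
    PySem.List.index? (l ++ t) v = (PySem.List.index? t v).map (· + l.length) := by
  induction l with
  | nil => simp
  | cons x xs ih =>
    have hx : x ≠ v := by intro e; exact h (e ▸ List.mem_cons_self)
    have hxs : v ∉ xs := fun m => h (List.mem_cons_of_mem _ m)
    rw [List.cons_append, PySem.List.index?_cons_of_ne _ hx, ih hxs, Option.map_map]
    cases PySem.List.index? t v with
    | none => simp
    | some k => simp

theorem pvFst_append (xs ys : List Bool) :
    pvFst (xs ++ ys) = (match pvFst xs with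
      | some f => some f
      | none => (pvFst ys).map (· + xs.length)) := by
  unfold pvFst
  by_cases hm : true ∈ xs
  · rw [PySem.List.index?_append_of_mem _ hm]
    cases h : PySem.List.index? xs true with
    | none => exact absurd hm ((PySem.List.index?_eq_none_iff _ _).mp h)
    | some k => rfl
  · rw [pv_index?_append_of_not_mem _ _ _ hm,
        (PySem.List.index?_eq_none_iff _ _).mpr hm]

theorem pvLst_append (xs ys : List Bool) :
    pvLst (xs ++ ys) = (match pvLst ys with
      | some l => some ((xs.length : Int) + l)
      | none => pvLst xs) := by
  unfold pvLst
  have hr : (xs ++ ys).reverse = ys.reverse ++ xs.reverse := by simp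
  by_cases hm : true ∈ ys.reverse
  · rw [hr, PySem.List.index?_append_of_mem _ hm]
    cases h : PySem.List.index? ys.reverse true with
    | none => exact absurd ((PySem.List.index?_eq_none_iff _ _).mp h) (by simpa using hm)
    | some r =>
      obtain ⟨hk, -, -⟩ := PySem.List.getElem_of_index?_eq_some h
      simp at hk ⊢
      omega
  · rw [hr, pv_index?_append_of_not_mem _ _ _ hm,
        (PySem.List.index?_eq_none_iff _ _).mpr hm]
    cases h : PySem.List.index? xs.reverse true with
    | none => rfl
    | some r =>
      obtain ⟨hk, -, -⟩ := PySem.List.getElem_of_index?_eq_some h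
      simp at hk ⊢
      omega

theorem pvFst_none_iff_pvLst_none (seg : List Bool) : pvFst seg = none ↔ pvLst seg = none := by
  unfold pvFst pvLst
  constructor
  · intro h
    have hm : true ∉ seg := (PySem.List.index?_eq_none_iff _ _).mp h
    rw [(PySem.List.index?_eq_none_iff _ _).mpr (by simpa using hm)]
  · intro h
    cases hrev : PySem.List.index? seg.reverse true with
    | some r => rw [hrev] at h; exact absurd h (by simp)
    | none =>
      have hm : true ∉ seg := by
        have := (PySem.List.index?_eq_none_iff _ _).mp hrev
        simpa using this
      exact (PySem.List.index?_eq_none_iff _ _).mpr hm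

-- the divide-and-conquer span computes exactly the front-scan first and back-scan last
theorem pvSpanB_char_aux : ∀ (n : Nat) (seg : List Bool) (base : Int), seg.length ≤ n →
    pvSpanB seg base = (match pvFst seg, pvLst seg with
      | some f, some l => some (base + (f : Int), base + l)
      | _, _ => none) := by
  intro n
  induction n with
  | zero =>
    intro seg base hle
    have : seg = [] := List.eq_nil_of_length_eq_zero (Nat.le_zero.mp hle)
    subst this
    rw [pvSpanB]
    simp [pvFst, PySem.List.index?]
  | succ n ih =>
    intro seg base hle
    rw [pvSpanB]
    by_cases h0 : seg.length = 0
    · have : seg = [] := List.eq_nil_of_length_eq_zero h0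
      subst this
      simp [pvFst, PySem.List.index?]
    · by_cases h1 : seg.length = 1
      · obtain ⟨v, hv⟩ := List.length_eq_one_iff.mp h1
        subst hv
        cases v with
        | true =>
          rw [show pvFst [true] = some 0 from by decide,
              show pvLst [true] = some 0 from by decide]
          simp [h0]
        | false =>
          rw [show pvFst [false] = none from by decide]
          simp [h0]
      · simp only [h0, h1, dif_neg, not_false_iff]
        set mid := seg.length / 2 with hmid
        have hsplit : seg.take mid ++ seg.drop mid = seg := List.take_append_drop _ _
        have hlen_take : (seg.take mid).length = mid := by
          simp [List.length_take]; omega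
        have hlen_drop : (seg.drop mid).length = seg.length - mid := by
          simp [List.length_drop]
        rw [ih (seg.take mid) base (by omega), ih (seg.drop mid) (base + (mid : Int)) (by omega)]
        conv_rhs => rw [← hsplit]
        rw [pvFst_append, pvLst_append]
        cases hF1 : pvFst (seg.take mid) with
        | none =>
          have hL1 : pvLst (seg.take mid) = none := (pvFst_none_iff_pvLst_none _).mp hF1
          rw [hL1]
          cases hF2 : pvFst (seg.drop mid) with
          | none =>
            have hL2 : pvLst (seg.drop mid) = none := (pvFst_none_iff_pvLst_none _).mp hF2
            rw [hL2]
            simp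
          | some f =>
            have hL2 : pvLst (seg.drop mid) ≠ none := by
              intro h
              have := (pvFst_none_iff_pvLst_none (seg.drop mid)).mpr h
              rw [hF2] at this; exact absurd this (by simp)
            cases hL2' : pvLst (seg.drop mid) with
            | none => exact absurd hL2' hL2
            | some l => simp [hlen_take] <;> omega
        | some f =>
          have hL1 : pvLst (seg.take mid) ≠ none := by
            intro h
            have := (pvFst_none_iff_pvLst_none (seg.take mid)).mpr h
            rw [hF1] at this; exact absurd this (by simp)
          cases hL1' : pvLst (seg.take mid) with
          | none => exact absurd hL1' hL1
          | some l =>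
            cases hF2 : pvFst (seg.drop mid) with
            | none =>
              have hL2 : pvLst (seg.drop mid) = none := (pvFst_none_iff_pvLst_none _).mp hF2
              rw [hL2]
            | some f2 =>
              have hL2 : pvLst (seg.drop mid) ≠ none := by
                intro h
                have := (pvFst_none_iff_pvLst_none (seg.drop mid)).mpr h
                rw [hF2] at this; exact absurd this (by simp)
              cases hL2' : pvLst (seg.drop mid) with
              | none => exact absurd hL2' hL2
              | some l2 => simp [hlen_take] <;> omega

theorem pvSpanB_char (seg : List Bool) (base : Int) :
    pvSpanB seg base = (match pvFst seg, pvLst seg with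
      | some f, some l => some (base + (f : Int), base + l)
      | _, _ => none) :=
  pvSpanB_char_aux seg.length seg base le_rfl

-- ===== VERDICT (by name: the statement is the Claim_ definition above) =====
theorem bounds_from_presence_py_spec : Claim_equal_bounds_from_presence_py := by
  intro pres block limit _
  unfold Spec_bounds_from_presence_py bounds_from_presence_py bounds_from_presence_py_alt
  have hloop := pvLoop_char pres 0 none none
  rw [show ((PySem.List.enumerate pres).foldl
      (fun (st : Option Int × Option Int) (p : Int × Bool) =>
        if p.2 then ((match st.1 with | none => some p.1 | some f => some f), some p.1) else st)
      (none, none)) = (PySem.List.enumerate pres).foldl pvStep (none, none) from rfl, hloop,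
      pvSpanB_char pres 0]
  simp only [pvFst, pvLst]
  cases hf : PySem.List.index? pres true with
  | none =>
    have hm : true ∉ pres := (PySem.List.index?_eq_none_iff _ _).mp hf
    rw [(PySem.List.index?_eq_none_iff _ _).mpr (show true ∉ pres.reverse by simpa using hm)]
    simp
  | some k =>
    have hm : true ∈ pres := (PySem.List.index?_isSome_iff _ _).mp (by rw [hf]; rfl)
    cases hrev : PySem.List.index? pres.reverse true with
    | none => exact absurd (by simpa using hm) ((PySem.List.index?_eq_none_iff _ _).mp hrev)
    | some r => simp
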